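-- pv_equiv track=rewrite | github.com/G3rgosz/ladder | ladder.py | checkLadder
-- ===== SOURCE A (Python) =====
-- def checkLadder(ladder, rungsnumber):
--     usable = True
--     badrungs = 0
--
--     for i in range(rungsnumber):
--         if(ladder[i] == 0):
--             badrungs +=1
--         else:
--             badrungs = 0
--         if(badrungs >= 3):
--             usable = False
--
--     return usable
-- ===== SOURCE B (Python) =====
-- def checkLadder(ladder, rungsnumber):
--     rungs = ladder[:max(rungsnumber, 0)]
--     return not any(rungs[i] == 0 and rungs[i + 1] == 0 and rungs[i + 2] == 0
--                    for i in range(len(rungs) - 2))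
-- ===== Notes on version B (the rewrite author's own statement) =====
-- stated objective: simpler
-- what changed: Replaces A's counter/reset state machine over indices with a slice of the scanned prefix and a single sliding-window check for three consecutive zeros.
import Mathlib
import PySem

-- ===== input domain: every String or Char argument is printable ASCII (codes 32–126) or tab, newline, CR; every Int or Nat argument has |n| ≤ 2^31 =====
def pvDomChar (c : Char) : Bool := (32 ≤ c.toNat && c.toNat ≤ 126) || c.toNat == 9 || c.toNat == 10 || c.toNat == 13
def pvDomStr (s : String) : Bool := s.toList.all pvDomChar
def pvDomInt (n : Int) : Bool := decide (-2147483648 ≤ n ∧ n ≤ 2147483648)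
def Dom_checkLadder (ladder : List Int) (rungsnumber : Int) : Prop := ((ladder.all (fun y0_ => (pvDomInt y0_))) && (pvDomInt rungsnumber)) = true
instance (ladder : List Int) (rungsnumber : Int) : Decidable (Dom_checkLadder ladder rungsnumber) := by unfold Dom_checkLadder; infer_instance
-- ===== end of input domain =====

-- B replaces A's counter/reset state machine with a slice of the scanned prefix and a
-- sliding-window check for three consecutive zeros (simpler, same cost).

-- ===== PORT A =====
-- one iteration of A's for-loop body; state none = IndexError already raised
def checkLadderStep (ladder : List Int) (st : Option (Bool × Int)) (i : Int) : Option (Bool × Int) :=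
  match st with
  | none => none
  | some (usable, badrungs) =>
    match PySem.List.pyGet? ladder i with
    | none => none
    | some v =>
      let badrungs' : Int := if v == 0 then badrungs + 1 else 0
      let usable' : Bool := if 3 ≤ badrungs' then false else usable
      some (usable', badrungs')

def checkLadder (ladder : List Int) (rungsnumber : Int) : Bool :=
  match (PySem.List.pyRange 0 rungsnumber 1).foldl (checkLadderStep ladder) (some (true, 0)) with
  | some (usable, _) => usable
  | none => false  -- IndexError: unreachable under Pre_checkLadder

-- ===== PORT B =====
def checkLadder_alt (ladder : List Int) (rungsnumber : Int) : Bool :=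
  let rungs := PySem.List.slice ladder none (some (max rungsnumber 0))
  !((List.range (rungs.length - 2)).any (fun i =>
      (rungs.getD i 1 == 0) && (rungs.getD (i + 1) 1 == 0) && (rungs.getD (i + 2) 1 == 0)))

-- ===== PRECONDITION & SPEC =====
-- Pre_ excludes exactly the inputs on which A raises IndexError (rungsnumber > len(ladder)).
def Pre_checkLadder (ladder : List Int) (rungsnumber : Int) : Prop :=
  rungsnumber ≤ (ladder.length : Int)
instance (ladder : List Int) (rungsnumber : Int) : Decidable (Pre_checkLadder ladder rungsnumber) := by
  unfold Pre_checkLadder; infer_instance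

def pvWitness_checkLadder : List Int × Int := ([1, 0, 0, 2, 0], 5)

def Spec_checkLadder (ladder : List Int) (rungsnumber : Int) (out : Bool) : Prop := out = checkLadder_alt ladder rungsnumber
instance (ladder : List Int) (rungsnumber : Int) (out : Bool) : Decidable (Spec_checkLadder ladder rungsnumber out) := by unfold Spec_checkLadder; infer_instance

-- ===== CLAIM (what is proved, stated in full; the proofs are below) =====
def Claim_equal_checkLadder : Prop := ∀ (ladder : List Int) (rungsnumber : Int), Dom_checkLadder ladder rungsnumber → Pre_checkLadder ladder rungsnumber → Spec_checkLadder ladder rungsnumber (checkLadder ladder rungsnumber)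

-- ===== LEMMAS AND PROOFS =====

-- A's loop, re-expressed over the list of scanned rungs (proof device only)
def loopL : List Int → Bool × Int → Bool × Int
  | [], st => st
  | v :: t, (u, b) =>
      let b' : Int := if v == 0 then b + 1 else 0
      loopL t (if 3 ≤ b' then false else u, b')

-- "a run of ≥3 zeros will be detected, given b zeros already pending"
def badB : List Int → Int → Bool
  | [], _ => false
  | v :: t, b =>
      let b' : Int := if v == 0 then b + 1 else 0
      decide (3 ≤ b') || badB t b'

-- structural "contains three consecutive zeros"
def hasRun : List Int → Bool
  | a :: b :: c :: t => (a == 0 && b == 0 && c == 0) || hasRun (b :: c :: t)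
  | _ => false

def pre1 : List Int → Bool
  | v :: _ => v == 0
  | [] => false

def pre2 : List Int → Bool
  | v :: t => (v == 0) && pre1 t
  | [] => false

theorem loopL_append (xs ys : List Int) (st : Bool × Int) :
    loopL (xs ++ ys) st = loopL ys (loopL xs st) := by
  induction xs generalizing st with
  | nil => simp [loopL]
  | cons v t ih => obtain ⟨u, b⟩ := st; simp [loopL, ih]

theorem loopL_fst (L : List Int) : ∀ (u : Bool) (b : Int),
    (loopL L (u, b)).1 = (u && !(badB L b)) := by
  induction L with
  | nil => intro u b; simp [loopL, badB]
  | cons v t ih =>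
    intro u b
    simp only [loopL, badB, ih]
    cases u <;> simp

theorem hasRun_cons_ne (v : Int) (t : List Int) (hv : ¬ v = 0) :
    hasRun (v :: t) = hasRun t := by
  match t with
  | [] => simp [hasRun]
  | [b] => simp [hasRun]
  | b :: c :: u => simp [hasRun, hv]

theorem hasRun_cons_zero (t : List Int) :
    hasRun (0 :: t) = (pre2 t || hasRun t) := by
  match t with
  | [] => simp [hasRun, pre2]
  | [b] => simp [hasRun, pre2, pre1]
  | b :: c :: u => simp [hasRun, pre2, pre1]

theorem badB_iff (L : List Int) : ∀ (b : Int), 0 ≤ b →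
    (badB L b = true ↔
      (hasRun L = true ∨ (2 ≤ b ∧ pre1 L = true) ∨ (1 ≤ b ∧ pre2 L = true))) := by
  induction L with
  | nil => intro b _; simp [badB, hasRun, pre1, pre2]
  | cons v t ih =>
    intro b hb
    by_cases hv : v = 0
    · subst hv
      have hstep : badB (0 :: t) b = (decide (3 ≤ b + 1) || badB t (b + 1)) := by
        simp [badB]
      rw [hstep, Bool.or_eq_true, ih (b + 1) (by omega), hasRun_cons_zero]
      simp only [pre1, pre2, decide_eq_true_eq, Bool.or_eq_true,
        beq_self_eq_true, Bool.true_and]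
      have e1 : (3 ≤ b + 1) ↔ 2 ≤ b := by omega
      have e2 : (2 ≤ b + 1) ↔ 1 ≤ b := by omega
      have e3 : (1 ≤ b + 1) ↔ True := iff_true_intro (by omega)
      rw [e1, e2, e3]
      tauto
    · have hstep : badB (v :: t) b = badB t 0 := by simp [badB, hv]
      rw [hstep, ih 0 le_rfl, hasRun_cons_ne v t hv]
      simp [pre1, pre2, hv]

theorem badB_zero (L : List Int) : badB L 0 = hasRun L := by
  rw [Bool.eq_iff_iff, badB_iff L 0 le_rfl]
  constructor
  · rintro (h | ⟨h, _⟩ | ⟨h, _⟩) <;> first | exact h | omega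
  · intro h; exact Or.inl h

-- B's window scan equals the structural run predicate
theorem winB_eq_hasRun (L : List Int) :
    ((List.range (L.length - 2)).any (fun i =>
        (L.getD i 1 == 0) && (L.getD (i + 1) 1 == 0) && (L.getD (i + 2) 1 == 0)))
      = hasRun L := by
  induction L with
  | nil => simp [hasRun]
  | cons a t ih =>
    match t, ih with
    | [], _ => simp [hasRun]
    | [b], _ => simp [hasRun]
    | b :: c :: u, ih =>
      have hlen : (a :: b :: c :: u).length - 2 = (b :: c :: u).length - 2 + 1 := by
        simp
      rw [hlen, List.range_succ_eq_map, List.any_cons, List.any_map]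
      rw [show hasRun (a :: b :: c :: u)
            = ((a == 0 && b == 0 && c == 0) || hasRun (b :: c :: u)) from rfl, ← ih]
      congr 1

-- A's fold over range(n) equals loopL over the scanned prefix
theorem fold_eq_loopL (ladder : List Int) (n : Nat) (hn : n ≤ ladder.length)
    (st : Bool × Int) :
    (PySem.List.pyRange 0 (n : Int) 1).foldl (checkLadderStep ladder) (some st)
      = some (loopL (ladder.take n) st) := by
  induction n generalizing st with
  | zero => simp [PySem.List.pyRange_one_eq_nil, loopL]
  | succ m ih =>
    have hml : m < ladder.length := by omega
    have hcast : ((m + 1 : Nat) : Int) = (m : Int) + 1 := by push_cast; ring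
    rw [hcast, PySem.List.pyRange_one_succ_right (Int.natCast_nonneg m),
        List.foldl_append, ih (by omega)]
    have hget : PySem.List.pyGet? ladder (m : Int) = some ladder[m] := by
      rw [PySem.List.pyGet?_natCast, List.getElem?_eq_getElem hml]
    have htake : ladder.take (m + 1) = ladder.take m ++ [ladder[m]] := by
      rw [List.take_add_one, List.getElem?_eq_getElem hml]; rfl
    rw [htake, loopL_append]
    obtain ⟨u, b⟩ := loopL (ladder.take m) st
    simp [checkLadderStep, hget, loopL]

-- ===== VERDICT (by name: the statement is the Claim_ definition above) =====
theorem checkLadder_spec : Claim_equal_checkLadder := by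
  intro ladder rungsnumber _ hpre
  unfold Spec_checkLadder checkLadder checkLadder_alt Pre_checkLadder at *
  by_cases hneg : rungsnumber ≤ 0
  · have hmax : max rungsnumber 0 = (0 : Int) := by omega
    rw [PySem.List.pyRange_one_eq_nil hneg, hmax, PySem.List.slice_to ladder (le_refl 0)]
    simp
  · have h0 : (0 : Int) ≤ rungsnumber := by omega
    have hcast : ((rungsnumber.toNat : Nat) : Int) = rungsnumber := Int.toNat_of_nonneg h0
    have hmax : max rungsnumber 0 = rungsnumber := by omega
    rw [hmax, PySem.List.slice_to ladder h0, ← hcast,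
        fold_eq_loopL ladder rungsnumber.toNat (by omega) (true, 0)]
    have h1 := loopL_fst (ladder.take rungsnumber.toNat) true 0
    rcases hl : loopL (ladder.take rungsnumber.toNat) (true, 0) with ⟨u, b⟩
    rw [hl] at h1
    simp only [Int.toNat_natCast]
    rw [show u = (true && !badB (List.take rungsnumber.toNat ladder) 0) from h1, badB_zero,
        ← winB_eq_hasRun (List.take rungsnumber.toNat ladder)]
    simp only [Bool.true_and]
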